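-- pv_equiv track=rewrite | github.com/chintanagrawal97/hiveBee | api/hiveHelper.py | get_specific_errors
-- ===== SOURCE A (Python) =====
-- def get_specific_errors(JsonRes):
--
--     #List containing specific errors
--     keywords_sp_error= [ "FAILED: ParseException", "Unsupported Hive type",
--     "MetaException", "Invalid entry in mapping", "AlreadyExistsException", "java.lang.RuntimeException: Unable to instantiate org.apache.hadoop.hive.ql.metadata.SessionHiveMetaStoreClient",
--     "java.net.ConnectException: Connection refused", "SemanticException","Killing container"];
--
--     SPECIFIC_ERROR_L = []
--
--     Jsonlength=len(JsonRes)
--     for SError in keywords_sp_error: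
--         SPECIFIC_ERROR = {}
--         SPECIFIC_ERROR[SError]={}
--         for i in range(Jsonlength):
--             temp=JsonRes[i]
--             ContaineridL=list(temp.keys())
--             ContainerID=ContaineridL[0]
--             value=temp[ContainerID]
--             ErrL=value['ERROR']
--             for err in ErrL:
--                 if SError in err:
--                     if ContainerID in SPECIFIC_ERROR[SError]:
--                         SPECIFIC_ERROR[SError][ContainerID].append(err)
--                     else:
--                         SPECIFIC_ERROR[SError][ContainerID]=[]
--                         SPECIFIC_ERROR[SError][ContainerID].append(err)
--
--         if SPECIFIC_ERROR not in SPECIFIC_ERROR_L: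
--             SPECIFIC_ERROR_L.append(SPECIFIC_ERROR)
--     return SPECIFIC_ERROR_L
-- ===== SOURCE B (Python) =====
-- def get_specific_errors(JsonRes):
--     keywords_sp_error = ["FAILED: ParseException", "Unsupported Hive type",
--         "MetaException", "Invalid entry in mapping", "AlreadyExistsException",
--         "java.lang.RuntimeException: Unable to instantiate org.apache.hadoop.hive.ql.metadata.SessionHiveMetaStoreClient",
--         "java.net.ConnectException: Connection refused", "SemanticException", "Killing container"]
--
--     # one dict per keyword, filled in a single pass over JsonRes
--     result = {kw: {} for kw in keywords_sp_error}
--     for temp in JsonRes: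
--         containerID = next(iter(temp))
--         for err in temp[containerID]['ERROR']:
--             for kw in keywords_sp_error:
--                 if kw in err:
--                     result[kw].setdefault(containerID, []).append(err)
--     return [{kw: result[kw]} for kw in keywords_sp_error]
-- ===== Notes on version B (the rewrite author's own statement) =====
-- stated objective: alternative
-- what changed: B makes one pass over JsonRes with the keyword loop innermost, grouping into a prebuilt keyword-to-dict table, instead of A's nine full scans of JsonRes (keywords outermost) with a never-firing dedup membership test on the result list.
import Mathlib
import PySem

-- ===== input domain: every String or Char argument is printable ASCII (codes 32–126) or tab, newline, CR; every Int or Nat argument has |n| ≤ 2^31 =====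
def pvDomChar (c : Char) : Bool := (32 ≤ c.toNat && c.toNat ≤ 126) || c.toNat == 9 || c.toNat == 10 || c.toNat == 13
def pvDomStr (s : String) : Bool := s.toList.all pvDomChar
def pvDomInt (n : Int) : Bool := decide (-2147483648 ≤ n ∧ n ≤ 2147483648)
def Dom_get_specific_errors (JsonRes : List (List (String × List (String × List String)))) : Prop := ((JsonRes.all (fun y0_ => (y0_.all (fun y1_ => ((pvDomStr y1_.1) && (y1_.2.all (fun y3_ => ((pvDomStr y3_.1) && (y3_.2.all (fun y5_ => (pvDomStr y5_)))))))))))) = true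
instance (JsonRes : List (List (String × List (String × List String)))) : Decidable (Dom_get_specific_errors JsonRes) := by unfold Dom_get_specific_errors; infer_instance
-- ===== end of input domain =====

-- B groups in ONE pass over JsonRes (keywords innermost) instead of A's 9 full scans (keywords outermost),
-- and drops A's never-firing dedup membership test; return value proved identical (objective: alternative decomposition).

-- ===== PORT A =====
-- the literal keyword list both Pythons carry
def pvKeywords : List String :=
  ["FAILED: ParseException", "Unsupported Hive type",
   "MetaException", "Invalid entry in mapping", "AlreadyExistsException",
   "java.lang.RuntimeException: Unable to instantiate org.apache.hadoop.hive.ql.metadata.SessionHiveMetaStoreClient",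
   "java.net.ConnectException: Connection refused", "SemanticException", "Killing container"]

-- A's body of the 'for i in range(Jsonlength)' loop for one keyword SError = kw.
-- The .getD defaults stand where Python raises (IndexError on empty temp, KeyError on missing 'ERROR'); Pre_ excludes those inputs.
def pvScanA (kw : String) (d : PySem.Dict String (List String))
    (temp : List (String × List (String × List String))) : PySem.Dict String (List String) :=
  let ContaineridL := temp.map Prod.fst                                    -- list(temp.keys())
  let ContainerID := (PySem.List.pyGet? ContaineridL 0).getD ""            -- ContaineridL[0]
  let value := ((PySem.Dict.mk temp).get? ContainerID).getD []             -- temp[ContainerID]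
  let ErrL := ((PySem.Dict.mk value).get? "ERROR").getD []                 -- value['ERROR']
  ErrL.foldl (fun d err =>
    if PySem.Str.isIn kw err then
      if d.contains ContainerID then d.insert ContainerID (d.getD ContainerID [] ++ [err])
      else d.insert ContainerID [err]                                      -- set to [] then append
    else d) d

-- membership test 'SPECIFIC_ERROR not in SPECIFIC_ERROR_L': plain list equality is exact here because each
-- SPECIFIC_ERROR is a single-key dict {kw: …} and Python dict equality on single-key dicts compares that pair
-- (the nested value dicts are compared only when the outer keys already coincide, and then they were built identically)
def get_specific_errors (JsonRes : List (List (String × List (String × List String)))) : List (List (String × List (String × List String))) :=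
  pvKeywords.foldl (fun SPECIFIC_ERROR_L SError =>
    let sp : PySem.Dict String (List String) :=
      (PySem.List.pyRange 0 (PySem.List.len JsonRes)).foldl
        (fun d i => pvScanA SError d (PySem.List.pyGetD JsonRes i [])) PySem.Dict.empty
    let SPECIFIC_ERROR : List (String × List (String × List String)) := [(SError, sp.items)]
    if SPECIFIC_ERROR ∈ SPECIFIC_ERROR_L then SPECIFIC_ERROR_L else SPECIFIC_ERROR_L ++ [SPECIFIC_ERROR]) []

-- ===== PORT B =====
-- B's body for one JsonRes entry: for each error, for each keyword, result[kw].setdefault(cid, []).append(err)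
def pvStepB (r : PySem.Dict String (PySem.Dict String (List String)))
    (temp : List (String × List (String × List String))) : PySem.Dict String (PySem.Dict String (List String)) :=
  match temp with
  | [] => r                                                                -- next(iter(temp)) raises; Pre_ excludes
  | (containerID, _) :: _ =>
    let errs := ((PySem.Dict.mk (((PySem.Dict.mk temp).get? containerID).getD [])).get? "ERROR").getD []
    errs.foldl (fun r err =>
      pvKeywords.foldl (fun r kw =>
        if PySem.Str.isIn kw err then
          r.modify kw PySem.Dict.empty (fun d => d.modify containerID [] (· ++ [err]))
        else r) r) r

def get_specific_errors_alt (JsonRes : List (List (String × List (String × List String)))) : List (List (String × List (String × List String))) :=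
  let init := pvKeywords.foldl (fun r kw => r.insert kw PySem.Dict.empty) PySem.Dict.empty  -- {kw: {} for kw in keywords}
  let result := JsonRes.foldl pvStepB init
  pvKeywords.map (fun kw => [(kw, (result.getD kw PySem.Dict.empty).items)])

-- ===== PRECONDITION & SPEC =====
-- Pre_ excludes exactly the entries on which Python A raises: an empty dict (IndexError on list(temp.keys())[0])
-- or a first value without an 'ERROR' key (KeyError); Python B raises there too (StopIteration / KeyError).
def Pre_get_specific_errors (JsonRes : List (List (String × List (String × List String)))) : Prop :=
  ∀ temp ∈ JsonRes, (temp.head?.map (fun p => (PySem.Dict.mk p.2).contains "ERROR")) = some true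

instance (JsonRes : List (List (String × List (String × List String)))) : Decidable (Pre_get_specific_errors JsonRes) := by
  unfold Pre_get_specific_errors; infer_instance

def pvWitness_get_specific_errors : (List (List (String × List (String × List String)))) :=
  [[("c1", [("ERROR", ["MetaException: boom", "ok"])])],
   [("c2", [("ERROR", ["Killing container now"]), ("INFO", [])])]]

def Spec_get_specific_errors (JsonRes : List (List (String × List (String × List String)))) (out : List (List (String × List (String × List String)))) : Prop := out = get_specific_errors_alt JsonRes
instance (JsonRes : List (List (String × List (String × List String)))) (out : List (List (String × List (String × List String)))) : Decidable (Spec_get_specific_errors JsonRes out) := by unfold Spec_get_specific_errors; infer_instance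

-- ===== CLAIM (what is proved, stated in full; the proofs are below) =====
def Claim_equal_get_specific_errors : Prop := ∀ (JsonRes : List (List (String × List (String × List String)))), Dom_get_specific_errors JsonRes → Pre_get_specific_errors JsonRes → Spec_get_specific_errors JsonRes (get_specific_errors JsonRes)

-- ===== LEMMAS AND PROOFS =====

-- shared semantic pieces: the container id and error list a JsonRes entry contributes
def pvCid (temp : List (String × List (String × List String))) : String :=
  (PySem.List.pyGet? (temp.map Prod.fst) 0).getD ""

def pvErrs (temp : List (String × List (String × List String))) : List String :=
  ((PySem.Dict.mk (((PySem.Dict.mk temp).get? (pvCid temp)).getD [])).get? "ERROR").getD []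

-- the per-entry update of one keyword's container dict
def pvStepK (kw : String) (d : PySem.Dict String (List String))
    (temp : List (String × List (String × List String))) : PySem.Dict String (List String) :=
  (pvErrs temp).foldl (fun d err =>
    if PySem.Str.isIn kw err then d.modify (pvCid temp) [] (· ++ [err]) else d) d

lemma pvKeywords_nodup : pvKeywords.Nodup := by decide

lemma addA_eq (d : PySem.Dict String (List String)) (cid err : String) :
    (if d.contains cid then d.insert cid (d.getD cid [] ++ [err]) else d.insert cid [err])
      = d.modify cid [] (· ++ [err]) := by
  unfold PySem.Dict.modify
  by_cases h : d.contains cid = true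
  · simp [h]
  · have h' : d.contains cid = false := by simpa using h
    simp [h', PySem.Dict.getD_of_not_contains d [] h']

lemma scanA_eq (kw : String) (d : PySem.Dict String (List String))
    (temp : List (String × List (String × List String))) : pvScanA kw d temp = pvStepK kw d temp := by
  simp only [pvScanA, pvStepK, pvErrs, pvCid]
  apply PySem.List.foldl_congr_mem
  intro acc err _
  by_cases h : PySem.Str.isIn kw err = true
  · rw [if_pos h, if_pos h]
    exact addA_eq acc _ err
  · rw [if_neg h, if_neg h]

lemma get?_mk_map {V : Type} (ks : List String) (g : String → V) (k : String) (hk : k ∈ ks) :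
    (PySem.Dict.mk (ks.map (fun k => (k, g k)))).get? k = some (g k) := by
  induction ks with
  | nil => simp at hk
  | cons a t ih =>
    simp only [List.map_cons, PySem.Dict.get?_mk_cons]
    by_cases h : a = k
    · subst h; simp
    · have hkt : k ∈ t := by
        rcases List.mem_cons.mp hk with h' | h'
        · exact absurd h'.symm h
        · exact h'
      simp [h, ih hkt]

lemma getD_mk_map {V : Type} (ks : List String) (g : String → V) (k : String) (d0 : V) (hk : k ∈ ks) :
    (PySem.Dict.mk (ks.map (fun k => (k, g k)))).getD k d0 = g k := by
  rw [PySem.Dict.getD_eq_get?_getD, get?_mk_map ks g k hk]; rfl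

lemma contains_mk_map {V : Type} (ks : List String) (g : String → V) (k : String) (hk : k ∈ ks) :
    (PySem.Dict.mk (ks.map (fun k => (k, g k)))).contains k = true := by
  rw [PySem.Dict.contains_eq_isSome_get?, get?_mk_map ks g k hk]; rfl

lemma insert_mk_map {V : Type} (ks : List String) (g : String → V) (k : String) (v : V) (hk : k ∈ ks) :
    (PySem.Dict.mk (ks.map (fun k => (k, g k)))).insert k v
      = PySem.Dict.mk (ks.map (fun k' => (k', if k' = k then v else g k'))) := by
  apply PySem.Dict.ext
  rw [PySem.Dict.items_insert_of_contains _ v (contains_mk_map ks g k hk)]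
  show (ks.map (fun k => (k, g k))).map _ = _
  rw [List.map_map]
  apply List.map_congr_left
  intro a _
  by_cases h : a = k <;> simp [h]

-- folding the keyword loop of one error over the full keyword table updates each slot independently
lemma kwfold (c : String → Bool) (f : PySem.Dict String (List String) → PySem.Dict String (List String)) :
    ∀ (ks : List String) (g : String → PySem.Dict String (List String)), ks.Nodup → (∀ k ∈ ks, k ∈ pvKeywords) →
    ks.foldl (fun r kw => if c kw then r.modify kw PySem.Dict.empty f else r)
        (PySem.Dict.mk (pvKeywords.map (fun k => (k, g k))))
      = PySem.Dict.mk (pvKeywords.map (fun k => (k, if k ∈ ks ∧ c k = true then f (g k) else g k))) := by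
  intro ks
  induction ks with
  | nil => intro g _ _; simp
  | cons kw t ih =>
    intro g hnd hsub
    have hkw : kw ∈ pvKeywords := hsub kw (by simp)
    obtain ⟨hkwt, hndt⟩ := List.nodup_cons.mp hnd
    have hsubt : ∀ k ∈ t, k ∈ pvKeywords := fun k hk => hsub k (List.mem_cons_of_mem _ hk)
    simp only [List.foldl_cons]
    by_cases hc : c kw = true
    · rw [if_pos hc]
      have hmod : (PySem.Dict.mk (pvKeywords.map (fun k => (k, g k)))).modify kw PySem.Dict.empty f
          = PySem.Dict.mk (pvKeywords.map (fun k => (k, if k = kw then f (g kw) else g k))) := by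
        unfold PySem.Dict.modify
        rw [getD_mk_map pvKeywords g kw _ hkw, insert_mk_map pvKeywords g kw _ hkw]
      rw [hmod, ih (fun k => if k = kw then f (g kw) else g k) hndt hsubt]
      congr 1
      apply List.map_congr_left
      intro a _
      by_cases hak : a = kw
      · subst hak
        simp [hkwt, hc]
      · by_cases hat : a ∈ t <;> simp [hak, hat, List.mem_cons]
    · rw [if_neg hc]
      rw [ih g hndt hsubt]
      congr 1
      apply List.map_congr_left
      intro a _
      by_cases hak : a = kw
      · subst hak
        have hc' : c a = false := by simpa using hc
        simp [hkwt, hc']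
      · by_cases hat : a ∈ t <;> simp [hak, hat, List.mem_cons]

-- one whole entry (all its errors) applied to the table
lemma errfold (errs : List String) (cid : String) :
    ∀ (g : String → PySem.Dict String (List String)),
    errs.foldl (fun r err =>
        pvKeywords.foldl (fun r kw =>
          if PySem.Str.isIn kw err then
            r.modify kw PySem.Dict.empty (fun d => d.modify cid [] (· ++ [err]))
          else r) r)
      (PySem.Dict.mk (pvKeywords.map (fun k => (k, g k))))
      = PySem.Dict.mk (pvKeywords.map (fun k =>
          (k, errs.foldl (fun d err => if PySem.Str.isIn k err then d.modify cid [] (· ++ [err]) else d) (g k)))) := by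
  induction errs with
  | nil => intro g; simp
  | cons err t ih =>
    intro g
    simp only [List.foldl_cons]
    rw [kwfold (fun kw => PySem.Str.isIn kw err)
        (fun d => d.modify cid [] (· ++ [err])) pvKeywords g pvKeywords_nodup (fun _ h => h)]
    have hmc : (pvKeywords.map (fun k =>
          (k, if k ∈ pvKeywords ∧ PySem.Str.isIn k err = true then (g k).modify cid [] (· ++ [err]) else g k)))
        = pvKeywords.map (fun k =>
          (k, if PySem.Str.isIn k err = true then (g k).modify cid [] (· ++ [err]) else g k)) := by
      apply List.map_congr_left
      intro a ha
      simp [ha]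
    rw [hmc, ih (fun k => if PySem.Str.isIn k err = true then (g k).modify cid [] (· ++ [err]) else g k)]

lemma stepB_tbl (temp : List (String × List (String × List String)))
    (g : String → PySem.Dict String (List String)) :
    pvStepB (PySem.Dict.mk (pvKeywords.map (fun k => (k, g k)))) temp
      = PySem.Dict.mk (pvKeywords.map (fun k => (k, pvStepK k (g k) temp))) := by
  match temp with
  | [] =>
    have h0 : pvErrs ([] : List (String × List (String × List String))) = [] := rfl
    simp [pvStepB, pvStepK, h0]
  | (cid, v) :: t =>
    have hcid : pvCid ((cid, v) :: t) = cid := by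
      simp [pvCid, PySem.List.pyGet?, PySem.List.pyIdx?]
    have hErrs : pvErrs ((cid, v) :: t)
        = ((PySem.Dict.mk (((PySem.Dict.mk ((cid, v) :: t)).get? cid).getD [])).get? "ERROR").getD [] := by
      rw [pvErrs, hcid]
    simp only [pvStepB]
    rw [← hErrs, errfold (pvErrs ((cid, v) :: t)) cid g]
    simp only [pvStepK, hcid]

lemma mainB (J : List (List (String × List (String × List String)))) :
    ∀ (g : String → PySem.Dict String (List String)),
    J.foldl pvStepB (PySem.Dict.mk (pvKeywords.map (fun k => (k, g k))))
      = PySem.Dict.mk (pvKeywords.map (fun k => (k, J.foldl (pvStepK k) (g k)))) := by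
  induction J with
  | nil => intro g; simp
  | cons temp t ih =>
    intro g
    simp only [List.foldl_cons]
    rw [stepB_tbl temp g, ih (fun k => pvStepK k (g k) temp)]

lemma initB : pvKeywords.foldl (fun r kw => r.insert kw PySem.Dict.empty) PySem.Dict.empty
    = PySem.Dict.mk (pvKeywords.map (fun k => (k, (PySem.Dict.empty : PySem.Dict String (List String))))) := by
  apply PySem.Dict.ext
  have h := PySem.Dict.items_foldl_insert_fresh pvKeywords (fun kw => kw)
      (fun _ => (PySem.Dict.empty : PySem.Dict String (List String))) PySem.Dict.empty
      (fun a _ => PySem.Dict.contains_empty a) (by simpa using pvKeywords_nodup)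
  simpa using h

-- A's outer loop: the dedup test never fires because each entry is keyed by a fresh keyword
lemma outerA (F : String → PySem.Dict String (List String)) :
    ∀ (ks : List String) (acc : List (List (String × List (String × List String)))), ks.Nodup →
    (∀ x ∈ acc, ∃ k d, x = [(k, d)] ∧ k ∉ ks) →
    ks.foldl (fun acc kw =>
        if [(kw, (F kw).items)] ∈ acc then acc else acc ++ [[(kw, (F kw).items)]]) acc
      = acc ++ ks.map (fun kw => [(kw, (F kw).items)]) := by
  intro ks
  induction ks with
  | nil => intro acc _ _; simp
  | cons kw t ih =>
    intro acc hnd hacc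
    obtain ⟨hkwt, hndt⟩ := List.nodup_cons.mp hnd
    simp only [List.foldl_cons]
    have hne : [(kw, (F kw).items)] ∉ acc := by
      intro hmem
      obtain ⟨k, d, hx, hk⟩ := hacc _ hmem
      have : kw = k := by
        have := congrArg (fun l => (l.headI : String × List (String × List String)).1) hx
        simpa using this
      exact hk (this ▸ List.mem_cons_self)
    rw [if_neg hne]
    rw [ih (acc ++ [[(kw, (F kw).items)]]) hndt ?_]
    · simp
    · intro x hx
      rcases List.mem_append.mp hx with h | h
      · obtain ⟨k, d, hx', hk⟩ := hacc _ h
        exact ⟨k, d, hx', fun hkt => hk (List.mem_cons_of_mem _ hkt)⟩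
      · refine ⟨kw, (F kw).items, by simpa using h, hkwt⟩

lemma A_closed (J : List (List (String × List (String × List String)))) :
    get_specific_errors J = pvKeywords.map (fun kw => [(kw, (J.foldl (pvStepK kw) PySem.Dict.empty).items)]) := by
  have hinner : ∀ kw : String,
      (PySem.List.pyRange 0 (PySem.List.len J)).foldl
          (fun d i => pvScanA kw d (PySem.List.pyGetD J i [])) PySem.Dict.empty
        = J.foldl (pvStepK kw) PySem.Dict.empty := by
    intro kw
    rw [PySem.List.foldl_pyRange_pyGetD J [] (pvScanA kw) PySem.Dict.empty (le_refl 0)]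
    simp only [Int.toNat_zero, List.drop_zero]
    apply PySem.List.foldl_congr_mem
    intro acc x _
    exact scanA_eq kw acc x
  show pvKeywords.foldl _ [] = _
  simp only [hinner]
  exact outerA (fun kw => J.foldl (pvStepK kw) PySem.Dict.empty) pvKeywords [] pvKeywords_nodup
    (by intro x hx; simp at hx)

lemma B_closed (J : List (List (String × List (String × List String)))) :
    get_specific_errors_alt J = pvKeywords.map (fun kw => [(kw, (J.foldl (pvStepK kw) PySem.Dict.empty).items)]) := by
  have hm := mainB J (fun _ => (PySem.Dict.empty : PySem.Dict String (List String)))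
  simp only [get_specific_errors_alt, initB, hm]
  apply List.map_congr_left
  intro kw hkw
  rw [getD_mk_map pvKeywords _ kw PySem.Dict.empty hkw]

-- ===== VERDICT (by name: the statement is the Claim_ definition above) =====
theorem get_specific_errors_spec : Claim_equal_get_specific_errors := by
  intro J _ _
  unfold Spec_get_specific_errors
  rw [A_closed, B_closed]
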